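-- pv_equiv track=rewrite | github.com/lucas-colab/New-folder | 3.py | binario_para_decimal_com_explicacao
-- ===== SOURCE A (Python) =====
-- def binario_para_decimal_com_explicacao(numero_binario):
--     decimal = 0
--     potencia = len(numero_binario) - 1
--     explicacao = ""
--
--     for i, digito in enumerate(numero_binario):
--         if digito == '1':
--             valor = 2 ** potencia
--             decimal += valor
--             if explicacao:
--                 explicacao += " + "
--             explicacao += f"({digito} × 2^{potencia})"
--         potencia -= 1
--
--     explicacao += f" = {decimal}"
--     return decimal, explicacao
-- ===== SOURCE B (Python) =====
-- def binario_para_decimal_com_explicacao(numero_binario):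
--     # Horner's method: the decimal value is built by doubling, no powers computed.
--     decimal = 0
--     for d in numero_binario:
--         decimal = decimal * 2 + (1 if d == '1' else 0)
--     # Scan the REVERSED string so exponents count up from 0; terms come out
--     # back-to-front and are reversed once at the end.
--     termos = []
--     for p, d in enumerate(reversed(numero_binario)):
--         if d == '1':
--             termos.append(f"(1 × 2^{p})")
--     termos.reverse()
--     explicacao = " + ".join(termos) + f" = {decimal}"
--     return decimal, explicacao
-- ===== Notes on version B (the rewrite author's own statement) =====
-- stated objective: alternative
-- what changed: Replaces A's single left-to-right loop that computes 2**potencia per set bit and grows the explanation with conditional separators by Horner's method (decimal built purely by doubling, no exponentiation) plus a separate scan of the REVERSED string that finds exponents counting up from 0, collects the terms back-to-front and reverses them before joining.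
import Mathlib
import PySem

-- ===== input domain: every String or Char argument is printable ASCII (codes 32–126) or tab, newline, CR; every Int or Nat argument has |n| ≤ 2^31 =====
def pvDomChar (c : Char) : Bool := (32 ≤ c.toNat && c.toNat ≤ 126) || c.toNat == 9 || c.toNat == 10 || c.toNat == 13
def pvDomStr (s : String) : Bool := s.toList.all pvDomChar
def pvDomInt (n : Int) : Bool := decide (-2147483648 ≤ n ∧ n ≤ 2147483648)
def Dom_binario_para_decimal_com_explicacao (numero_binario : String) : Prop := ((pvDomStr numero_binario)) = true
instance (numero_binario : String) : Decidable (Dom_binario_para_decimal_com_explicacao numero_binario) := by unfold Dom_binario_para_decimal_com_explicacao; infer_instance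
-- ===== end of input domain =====

-- B replaces A's per-bit 2**potencia accumulation by Horner doubling for the decimal, and
-- builds the explanation by scanning the REVERSED string (exponents counting up from 0),
-- reversing the collected terms before joining; objective: alternative.

-- ===== PORT A =====
-- literal transliteration of A's loop: state (decimal, potencia, explicacao);
-- 2 ** potencia ported as 2 ^ potencia.toNat (inside the '1' branch potencia = len-1-i ≥ 0, as in Python)
def binario_para_decimal_com_explicacao (numero_binario : String) : Int × String :=
  let cs := numero_binario.toList
  let r : Int × Int × String := cs.foldl (fun st digito =>
      if digito = '1' then
        let valor : Int := 2 ^ st.2.1.toNat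
        let exp1 := if st.2.2 ≠ "" then st.2.2 ++ " + " else st.2.2
        (st.1 + valor, st.2.1 - 1,
          exp1 ++ "(" ++ String.ofList [digito] ++ " × 2^" ++ PySem.Int.toStr st.2.1 ++ ")")
      else (st.1, st.2.1 - 1, st.2.2))
    (0, (cs.length : Int) - 1, "")
  (r.1, r.2.2 ++ " = " ++ PySem.Int.toStr r.1)

-- ===== PORT B =====
-- transliteration of Source B: Horner fold for the decimal; terms collected from the
-- reversed character list (enumerate from 0, keep the '1' positions), then reversed and joined
def binario_para_decimal_com_explicacao_alt (numero_binario : String) : Int × String :=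
  let cs := numero_binario.toList
  let decimal : Int := cs.foldl (fun acc d => acc * 2 + (if d = '1' then 1 else 0)) 0
  let termos : List String := (PySem.List.enumerate cs.reverse).filterMap
      (fun p => if p.2 = '1' then some ("(1 × 2^" ++ PySem.Int.toStr p.1 ++ ")") else none)
  let explicacao := PySem.Str.join " + " termos.reverse ++ " = " ++ PySem.Int.toStr decimal
  (decimal, explicacao)

-- ===== PRECONDITION & SPEC =====
def Spec_binario_para_decimal_com_explicacao (numero_binario : String) (out : Int × String) : Prop := out = binario_para_decimal_com_explicacao_alt numero_binario
instance (numero_binario : String) (out : Int × String) : Decidable (Spec_binario_para_decimal_com_explicacao numero_binario out) := by unfold Spec_binario_para_decimal_com_explicacao; infer_instance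

-- ===== CLAIM (what is proved, stated in full; the proofs are below) =====
def Claim_equal_binario_para_decimal_com_explicacao : Prop := ∀ (numero_binario : String), Dom_binario_para_decimal_com_explicacao numero_binario → Spec_binario_para_decimal_com_explicacao numero_binario (binario_para_decimal_com_explicacao numero_binario)

-- ===== LEMMAS AND PROOFS =====

-- positions of '1' digits, counting DOWN from pot (A's traversal order)
def pvPosF : Int → List Char → List Int
  | _, [] => []
  | pot, c :: cs => if c = '1' then pot :: pvPosF (pot - 1) cs else pvPosF (pot - 1) cs

-- positions of '1' digits, counting UP from s (B's reversed traversal)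
def pvPosR : Int → List Char → List Int
  | _, [] => []
  | s, c :: cs => if c = '1' then s :: pvPosR (s + 1) cs else pvPosR (s + 1) cs

def pvTerm (p : Int) : String := "(1 × 2^" ++ PySem.Int.toStr p ++ ")"

-- " + "-prefixed tail of the explanation
def pvRest : List Int → String
  | [] => ""
  | p :: ps => " + " ++ pvTerm p ++ pvRest ps

lemma pvPosR_enum (cs : List Char) : ∀ (s : Int),
    (PySem.List.enumerate cs s).filterMap
      (fun p => if p.2 = '1' then some p.1 else none) = pvPosR s cs := by
  induction cs with
  | nil => intro s; simp [pvPosR, PySem.List.enumerate_nil]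
  | cons c cs ih =>
    intro s
    rw [PySem.List.enumerate_cons, List.filterMap_cons]
    by_cases h : c = '1' <;> simp [h, pvPosR, ih (s + 1)]

lemma pvPosR_append (xs ys : List Char) : ∀ (s : Int),
    pvPosR s (xs ++ ys) = pvPosR s xs ++ pvPosR (s + xs.length) ys := by
  induction xs with
  | nil => intro s; simp [pvPosR]
  | cons x xs ih =>
    intro s
    by_cases h : x = '1' <;>
      simp [pvPosR, h, ih (s + 1), show s + 1 + (xs.length : Int) = s + ((xs.length : Int) + 1) by ring]

lemma pvPosR_reverse (cs : List Char) : ∀ (s : Int),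
    pvPosR s cs.reverse = (pvPosF (s + cs.length - 1) cs).reverse := by
  induction cs with
  | nil => intro s; simp [pvPosR, pvPosF]
  | cons c cs ih =>
    intro s
    rw [List.reverse_cons, pvPosR_append, ih s, List.length_reverse]
    have hpot : s + (((c :: cs).length : Nat) : Int) - 1 = s + (cs.length : Int) := by
      push_cast [List.length_cons]; ring
    rw [hpot]
    by_cases h : c = '1' <;> simp [pvPosR, pvPosF, h]

lemma pvFilterMap_term (l : List (Int × Char)) :
    l.filterMap (fun p => if p.2 = '1' then some ("(1 × 2^" ++ PySem.Int.toStr p.1 ++ ")") else none)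
      = (l.filterMap (fun p => if p.2 = '1' then some p.1 else none)).map pvTerm := by
  induction l with
  | nil => rfl
  | cons p l ih =>
    by_cases h : p.2 = '1' <;> simp [h, ih, pvTerm]

-- Horner's fold equals acc·2^n plus the sum of the powers at the '1' positions
lemma pvHorner_spec (cs : List Char) : ∀ (acc : Int),
    cs.foldl (fun a d => a * 2 + (if d = '1' then 1 else 0)) acc
      = acc * 2 ^ cs.length
        + ((pvPosF ((cs.length : Int) - 1) cs).map (fun p => (2 : Int) ^ p.toNat)).sum := by
  induction cs with
  | nil => intro acc; simp [pvPosF]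
  | cons c cs ih =>
    intro acc
    rw [List.foldl_cons, ih]
    have hlen : ((c :: cs).length : Int) - 1 = (cs.length : Int) := by push_cast [List.length_cons]; ring
    rw [hlen]
    by_cases h : c = '1'
    · have hp : pvPosF ((cs.length : Int)) (c :: cs) = (cs.length : Int) :: pvPosF ((cs.length : Int) - 1) cs := by
        simp [pvPosF, h]
      rw [hp]
      simp only [h, if_pos, List.map_cons, List.sum_cons, List.length_cons, Int.toNat_natCast]
      ring
    · have hp : pvPosF ((cs.length : Int)) (c :: cs) = pvPosF ((cs.length : Int) - 1) cs := by
        simp [pvPosF, h]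
      rw [hp]
      simp only [h, if_false, List.length_cons]
      ring

lemma pvTerm_ne_empty (p : Int) : pvTerm p ≠ "" := by
  intro h
  have := congrArg String.toList h
  simp [pvTerm] at this

lemma append_ne_empty (e t : String) (ht : t ≠ "") : e ++ t ≠ "" := by
  intro h
  apply ht
  have := congrArg String.toList h
  simp at this
  exact String.toList_inj.mp (by simp [this.2])

-- A's separator-accumulating loop on a nonempty accumulator appends pvRest
lemma pvJoinAcc_ne (ps : List Int) : ∀ (e : String), e ≠ "" →
    ps.foldl (fun exp p => (if exp ≠ "" then exp ++ " + " else exp) ++ pvTerm p) e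
      = e ++ pvRest ps := by
  induction ps with
  | nil => intro e _; simp [pvRest]
  | cons p ps ih =>
    intro e he
    have hne : e ++ " + " ++ pvTerm p ≠ "" :=
      append_ne_empty _ _ (pvTerm_ne_empty p)
    simp only [List.foldl_cons, if_pos he, pvRest]
    rw [ih _ hne]
    simp [String.append_assoc]

lemma pvJoin_tail (ps : List Int) : ∀ (p : Int),
    PySem.Str.join " + " ((p :: ps).map pvTerm) = pvTerm p ++ pvRest ps := by
  induction ps with
  | nil =>
    intro p
    apply String.toList_inj.mp
    simp [pvRest, PySem.Chars.join_singleton]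
  | cons q qs ih =>
    intro p
    apply String.toList_inj.mp
    have ihq := congrArg String.toList (ih q)
    simp only [List.map_cons, PySem.Str.toList_join, String.toList_append] at ihq ⊢
    rw [PySem.Chars.join_cons_cons]
    simp only [pvRest, String.toList_append] at ihq ⊢
    rw [ihq]
    simp

lemma pvJoin_eq (ps : List Int) :
    ps.foldl (fun exp p => (if exp ≠ "" then exp ++ " + " else exp) ++ pvTerm p) ""
      = PySem.Str.join " + " (ps.map pvTerm) := by
  cases ps with
  | nil => decide
  | cons p ps =>
    rw [List.foldl_cons, if_neg (by simp),
        show ("" : String) ++ pvTerm p = pvTerm p from by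
          apply String.toList_inj.mp; simp,
        pvJoinAcc_ne ps (pvTerm p) (pvTerm_ne_empty p), pvJoin_tail]

def pvFoldA (cs : List Char) (st : Int × Int × String) : Int × Int × String :=
  cs.foldl (fun st digito =>
      if digito = '1' then
        let valor : Int := 2 ^ st.2.1.toNat
        let exp1 := if st.2.2 ≠ "" then st.2.2 ++ " + " else st.2.2
        (st.1 + valor, st.2.1 - 1,
          exp1 ++ "(" ++ String.ofList [digito] ++ " × 2^" ++ PySem.Int.toStr st.2.1 ++ ")")
      else (st.1, st.2.1 - 1, st.2.2)) st

lemma pvTerm_shape (p : Int) (e : String) :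
    e ++ "(" ++ String.ofList ['1'] ++ " × 2^" ++ PySem.Int.toStr p ++ ")" = e ++ pvTerm p := by
  apply String.toList_inj.mp
  have h1 : (String.ofList ['1']).toList = ['1'] := rfl
  simp [pvTerm, h1]

lemma pvFoldA_spec (cs : List Char) : ∀ (dec pot : Int) (e : String),
    pvFoldA cs (dec, pot, e) =
      (dec + ((pvPosF pot cs).map (fun p => (2 : Int) ^ p.toNat)).sum,
       pot - cs.length,
       (pvPosF pot cs).foldl
         (fun exp p => (if exp ≠ "" then exp ++ " + " else exp) ++ pvTerm p) e) := by
  induction cs with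
  | nil => intro dec pot e; simp [pvFoldA, pvPosF]
  | cons c cs ih =>
    intro dec pot e
    simp only [pvFoldA] at ih ⊢
    rw [List.foldl_cons]
    by_cases h : c = '1'
    · subst h
      rw [if_pos rfl]
      simp only []
      rw [pvTerm_shape pot, ih]
      have hp : pvPosF pot ('1' :: cs) = pot :: pvPosF (pot - 1) cs := by simp [pvPosF]
      rw [hp]
      simp only [List.map_cons, List.sum_cons, List.foldl_cons, List.length_cons,
        Prod.mk.injEq]
      simp only [and_true]
      constructor
      · ring
      · push_cast; ring
    · rw [if_neg h, ih]
      have hp : pvPosF pot (c :: cs) = pvPosF (pot - 1) cs := by simp [pvPosF, h]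
      rw [hp]
      simp only [List.length_cons, Prod.mk.injEq, true_and, and_true]
      push_cast; ring

-- ===== VERDICT (by name: the statement is the Claim_ definition above) =====
theorem binario_para_decimal_com_explicacao_spec : Claim_equal_binario_para_decimal_com_explicacao := by
  intro s _
  unfold Spec_binario_para_decimal_com_explicacao
  unfold binario_para_decimal_com_explicacao binario_para_decimal_com_explicacao_alt
  simp only []
  have hA : (s.toList.foldl (fun st digito =>
      if digito = '1' then
        let valor : Int := 2 ^ st.2.1.toNat
        let exp1 := if st.2.2 ≠ "" then st.2.2 ++ " + " else st.2.2
        (st.1 + valor, st.2.1 - 1,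
          exp1 ++ "(" ++ String.ofList [digito] ++ " × 2^" ++ PySem.Int.toStr st.2.1 ++ ")")
      else (st.1, st.2.1 - 1, st.2.2))
    (0, (s.toList.length : Int) - 1, ""))
      = pvFoldA s.toList (0, (s.toList.length : Int) - 1, "") := rfl
  have hdec : s.toList.foldl (fun acc d => acc * 2 + (if d = '1' then 1 else 0)) 0
      = ((pvPosF ((s.toList.length : Int) - 1) s.toList).map (fun p => (2 : Int) ^ p.toNat)).sum := by
    rw [pvHorner_spec]; ring
  have hpos : ((PySem.List.enumerate s.toList.reverse 0).filterMap
      (fun p => if p.2 = '1' then some ("(1 × 2^" ++ PySem.Int.toStr p.1 ++ ")") else none))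
      = ((pvPosF ((s.toList.length : Int) - 1) s.toList).reverse).map pvTerm := by
    rw [pvFilterMap_term, pvPosR_enum, pvPosR_reverse]
    simp
  rw [hA, pvFoldA_spec, hdec, hpos, List.map_reverse, List.reverse_reverse, ← pvJoin_eq]
  simp
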